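-- pv_equiv track=rewrite | github.com/CodeJayFlick/DANGER-Repository | cleaned_ai_data_7/11626.java_5282.py | evaluate_binary
-- ===== SOURCE A (Python) =====
-- def evaluate_binary(sizeout, sizein, in1, in2):
--     if sizein <= 0:
--         return 0
--     else:
--         mask = (1 << sizein) - 1
--         in1 &= mask
--         in2 &= mask
--         if in1 == in2:
--             return 0
--         elif sizein < 8:
--             return int(in1 < in2)
--         else:
--             bit_mask = 0x80
--             for _ in range(sizein - 1):
--                 bit_mask <<= 8
--             bit1 = (in1 & bit_mask) >> ((sizein - 1) * 8)
--             bit2 = (in2 & bit_mask) >> ((sizein - 1) * 8)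
--             if bit1 != bit2:
--                 return int(bit1 != 0)
--             else:
--                 return int(in1 < in2)
-- ===== SOURCE B (Python) =====
-- def evaluate_binary(sizeout, sizein, in1, in2):
--     # A's signed sign-bit test looks at bit 8*sizein-1, but the operands are
--     # masked to sizein bits, so that bit is always 0: plain unsigned compare.
--     if sizein <= 0:
--         return 0
--     mask = (1 << sizein) - 1
--     return int((in1 & mask) < (in2 & mask))
-- ===== Notes on version B (the rewrite author's own statement) =====
-- stated objective: faster
-- what changed: A's signed branch (a loop of sizein-1 shifts building a byte-position sign-bit mask, then sign-bit extraction) is dead code because the sign bit sits at bit 8*sizein-1 while the operands are masked to sizein bits; B is a single masked unsigned comparison with no loop.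
import Mathlib
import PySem

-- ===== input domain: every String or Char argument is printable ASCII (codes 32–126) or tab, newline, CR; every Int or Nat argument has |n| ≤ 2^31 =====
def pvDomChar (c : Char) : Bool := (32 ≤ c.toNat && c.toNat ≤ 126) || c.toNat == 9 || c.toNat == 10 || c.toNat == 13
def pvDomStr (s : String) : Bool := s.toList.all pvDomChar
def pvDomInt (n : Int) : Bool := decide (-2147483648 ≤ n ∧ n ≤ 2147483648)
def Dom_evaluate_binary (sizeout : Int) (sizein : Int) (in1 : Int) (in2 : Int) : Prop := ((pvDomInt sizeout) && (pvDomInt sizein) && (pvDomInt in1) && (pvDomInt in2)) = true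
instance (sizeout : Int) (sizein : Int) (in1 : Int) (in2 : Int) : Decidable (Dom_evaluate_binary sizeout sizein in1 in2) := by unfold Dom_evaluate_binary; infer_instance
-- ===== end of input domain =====

-- B replaces A's dead signed sign-bit branch (the sign bit at 8*sizein-1 is always 0
-- after masking to sizein bits) by a single masked unsigned comparison: simpler.

-- ===== PORT A =====
def evaluate_binary (sizeout : Int) (sizein : Int) (in1 : Int) (in2 : Int) : Int :=
  if sizein ≤ 0 then 0
  else
    let mask : Int := ((1 : Int) <<< sizein.toNat) - 1
    let in1 := PySem.Int.band in1 mask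
    let in2 := PySem.Int.band in2 mask
    if in1 = in2 then 0
    else if sizein < 8 then (if in1 < in2 then 1 else 0)
    else
      let bit_mask : Int :=
        (PySem.List.pyRange 0 (sizein - 1) 1).foldl (fun bm _ => bm <<< (8 : Nat)) 0x80
      let bit1 := (PySem.Int.band in1 bit_mask) >>> ((sizein - 1) * 8).toNat
      let bit2 := (PySem.Int.band in2 bit_mask) >>> ((sizein - 1) * 8).toNat
      if bit1 ≠ bit2 then (if bit1 ≠ 0 then 1 else 0)
      else (if in1 < in2 then 1 else 0)

-- ===== PORT B =====
def evaluate_binary_alt (sizeout : Int) (sizein : Int) (in1 : Int) (in2 : Int) : Int :=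
  if sizein ≤ 0 then 0
  else
    let mask : Int := ((1 : Int) <<< sizein.toNat) - 1
    if PySem.Int.band in1 mask < PySem.Int.band in2 mask then 1 else 0

-- ===== PRECONDITION & SPEC =====
def Spec_evaluate_binary (sizeout : Int) (sizein : Int) (in1 : Int) (in2 : Int) (out : Int) : Prop := out = evaluate_binary_alt sizeout sizein in1 in2
instance (sizeout : Int) (sizein : Int) (in1 : Int) (in2 : Int) (out : Int) : Decidable (Spec_evaluate_binary sizeout sizein in1 in2 out) := by unfold Spec_evaluate_binary; infer_instance

-- ===== CLAIM (what is proved, stated in full; the proofs are below) =====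
def Claim_equal_evaluate_binary : Prop := ∀ (sizeout : Int) (sizein : Int) (in1 : Int) (in2 : Int), Dom_evaluate_binary sizeout sizein in1 in2 → Spec_evaluate_binary sizeout sizein in1 in2 (evaluate_binary sizeout sizein in1 in2)

-- ===== LEMMAS AND PROOFS =====

-- a & m lies in [0, m] whenever 0 ≤ m, for any integer a (Python two's complement)
theorem pv_band_nonneg_le {a m : Int} (hm : 0 ≤ m) :
    0 ≤ PySem.Int.band a m ∧ PySem.Int.band a m ≤ m := by
  unfold PySem.Int.band
  by_cases h1 : 0 ≤ a <;> simp only [h1, hm, if_true, if_false]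
  · have := Nat.and_le_right (n := a.toNat) (m := m.toNat)
    omega
  · have := Nat.sub_le m.toNat (m.toNat &&& (-a - 1).toNat)
    omega

-- the loop `for _ in range(n): bm <<= 8` is a shift by 8*length
theorem pv_foldl_shift (l : List Int) (x : Int) :
    l.foldl (fun (bm : Int) (_ : Int) => bm <<< (8 : Nat)) x = x <<< (8 * l.length) := by
  induction l generalizing x with
  | nil => simp
  | cons h t ih =>
      simp only [List.foldl_cons, List.length_cons, ih]
      rw [Int.shiftLeft_eq, Int.shiftLeft_eq, Int.shiftLeft_eq, mul_assoc, ← pow_add]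
      have h8 : 8 + 8 * t.length = 8 * (t.length + 1) := by omega
      rw [h8]

-- ===== VERDICT (by name: the statement is the Claim_ definition above) =====
theorem evaluate_binary_spec : Claim_equal_evaluate_binary := by
  unfold Claim_equal_evaluate_binary
  intro sizeout sizein in1 in2 _
  unfold Spec_evaluate_binary evaluate_binary evaluate_binary_alt
  by_cases hle : sizein ≤ 0
  · simp [hle]
  · simp only [if_neg hle]
    set mask : Int := ((1 : Int) <<< sizein.toNat) - 1 with hmask
    have hs1 : 1 ≤ sizein.toNat := by omega
    have hmaskval : mask = (2 : Int) ^ sizein.toNat - 1 := by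
      rw [hmask, Int.shiftLeft_eq]; ring
    have hmnn : 0 ≤ mask := by
      rw [hmaskval]
      have : (1:Int) ≤ 2 ^ sizein.toNat := one_le_pow₀ (by norm_num)
      omega
    obtain ⟨h1l, h1u⟩ := pv_band_nonneg_le (a := in1) hmnn
    obtain ⟨h2l, h2u⟩ := pv_band_nonneg_le (a := in2) hmnn
    set a1 := PySem.Int.band in1 mask
    set a2 := PySem.Int.band in2 mask
    by_cases heq : a1 = a2
    · simp [heq]
    · simp only [if_neg heq]
      by_cases hlt8 : sizein < 8
      · simp [hlt8]
      · simp only [if_neg hlt8]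
        -- the sign-bit mask is 2^(8*sizein - 1), above every masked bit
        have hbm : (PySem.List.pyRange 0 (sizein - 1) 1).foldl (fun (bm : Int) (_ : Int) => bm <<< (8 : Nat)) (0x80 : Int)
            = ((2 : Nat) ^ (8 * (sizein - 1).toNat + 7) : Nat) := by
          rw [pv_foldl_shift, PySem.List.length_pyRange_one, Int.shiftLeft_eq]
          have : ((sizein - 1) - 0).toNat = (sizein - 1).toNat := by omega
          rw [this]
          push_cast
          rw [pow_add]
          ring
        rw [hbm]
        have hband0 : ∀ b : Int, 0 ≤ b → b ≤ mask →
            PySem.Int.band b ((2 : Nat) ^ (8 * (sizein - 1).toNat + 7) : Nat) = 0 := by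
          intro b hb0 hbm'
          rw [PySem.Int.band_of_nonneg hb0 (Int.natCast_nonneg _)]
          have hblt : b.toNat < 2 ^ sizein.toNat := by
            rw [hmaskval] at hbm'
            have hc : ((2 ^ sizein.toNat : Nat) : Int) = 2 ^ sizein.toNat := by push_cast; ring
            omega
          have hexp : sizein.toNat ≤ 8 * (sizein - 1).toNat + 7 := by omega
          have : b.toNat < 2 ^ (8 * (sizein - 1).toNat + 7) :=
            lt_of_lt_of_le hblt (Nat.pow_le_pow_right (by norm_num) hexp)
          rw [Int.toNat_natCast, Nat.and_two_pow, Nat.testBit_lt_two_pow this]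
          simp
        rw [hband0 a1 h1l h1u, hband0 a2 h2l h2u]
        simp
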